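-- pv_equiv track=rewrite | github.com/aorursy/KT_dataset_py | tqtrinh_image-captioning-flickr30k.py | _match_enums
-- ===== SOURCE A (Python) =====
-- def _match_enums(enum_hypothesis_list, enum_reference_list):
--
--     word_match = []
--
--     string_ = []
--
--     for i in range(len(enum_hypothesis_list))[::-1]:
--
--         for j in range(len(enum_reference_list))[::-1]:
--
--             if enum_hypothesis_list[i][1] == enum_reference_list[j][1]:
--
--                 word_match.append(
--
--                     (enum_hypothesis_list[i][0], enum_reference_list[j][0])
--
--                 )
--
--                 # string_.append(enum_hypothesis_list[i][1], enum_reference_list[j][1])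
--
--                 (enum_hypothesis_list.pop(i)[1], enum_reference_list.pop(j)[1])
--
--                 break
--
--     return word_match, enum_hypothesis_list, enum_reference_list
-- ===== SOURCE B (Python) =====
-- def _match_enums(enum_hypothesis_list, enum_reference_list):
--     # One pass over the references builds, per word, the ascending stack of its
--     # reference indices; one descending pass over the hypotheses pops matches.
--     # Performs the same in-place update of both argument lists as the original.
--     stacks = {}
--     for j, (_, w) in enumerate(enum_reference_list):
--         stacks.setdefault(w, []).append(j)
--     word_match = []
--     new_h = []
--     matched_r = set()
--     for i in reversed(range(len(enum_hypothesis_list))):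
--         num, w = enum_hypothesis_list[i]
--         stack = stacks.get(w)
--         if stack:
--             j = stack.pop()
--             word_match.append((num, enum_reference_list[j][0]))
--             matched_r.add(j)
--         else:
--             new_h.append(enum_hypothesis_list[i])
--     new_h.reverse()
--     new_r = [p for j, p in enumerate(enum_reference_list) if j not in matched_r]
--     enum_hypothesis_list[:] = new_h
--     enum_reference_list[:] = new_r
--     return word_match, enum_hypothesis_list, enum_reference_list
-- ===== Notes on version B (the rewrite author's own statement) =====
-- stated objective: faster
-- what changed: Replaces the nested reverse index scans with index popping by a single pass that builds a word-to-ascending-reference-index stack dict, then one descending pass over the hypotheses popping the largest remaining reference index per word; remainders are rebuilt by filtering instead of repeated pops.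
import Mathlib
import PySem

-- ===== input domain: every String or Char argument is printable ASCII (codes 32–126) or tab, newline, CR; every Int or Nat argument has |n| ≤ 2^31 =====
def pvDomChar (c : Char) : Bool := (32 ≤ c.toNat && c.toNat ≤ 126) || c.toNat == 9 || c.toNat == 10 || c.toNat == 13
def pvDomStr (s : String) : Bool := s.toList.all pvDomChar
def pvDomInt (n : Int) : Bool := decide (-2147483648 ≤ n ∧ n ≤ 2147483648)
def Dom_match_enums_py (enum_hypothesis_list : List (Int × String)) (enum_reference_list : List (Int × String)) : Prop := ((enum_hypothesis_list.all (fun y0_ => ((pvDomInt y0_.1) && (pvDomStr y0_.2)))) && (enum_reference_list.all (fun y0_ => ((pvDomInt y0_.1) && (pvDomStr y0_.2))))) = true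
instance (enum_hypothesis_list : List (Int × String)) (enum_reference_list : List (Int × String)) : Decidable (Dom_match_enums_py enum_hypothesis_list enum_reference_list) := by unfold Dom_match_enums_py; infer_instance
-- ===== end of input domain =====

-- B replaces A's nested reverse scans by a word→index-stack dict built in one pass (faster);
-- both Pythons mutate the argument lists the same way; the equivalence proved is about the return value.

-- ===== PORT A =====
-- inner 'for j in range(len(r))[::-1]: if … break' — returns the first matching j of the given index list
def pvFindJ (w : String) (r : List (Int × String)) : List Nat → Option Nat
  | [] => none
  | j :: js => if (r.getD j (0, "")).2 = w then some j else pvFindJ w r js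

-- outer loop over the precomputed index list range(len(h))[::-1], with h and r mutating (pop = eraseIdx)
def pvOuterA : List Nat → List (Int × Int) → List (Int × String) → List (Int × String) →
    (List (Int × Int)) × (List (Int × String)) × (List (Int × String))
  | [], wm, h, r => (wm, h, r)
  | i :: is, wm, h, r =>
    match pvFindJ (h.getD i (0, "")).2 r ((List.range r.length).reverse) with
    | some j => pvOuterA is (wm ++ [((h.getD i (0, "")).1, (r.getD j (0, "")).1)]) (h.eraseIdx i) (r.eraseIdx j)
    | none => pvOuterA is wm h r

def match_enums_py (enum_hypothesis_list : List (Int × String)) (enum_reference_list : List (Int × String)) : (List (Int × Int)) × (List (Int × String)) × (List (Int × String)) :=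
  pvOuterA ((List.range enum_hypothesis_list.length).reverse) [] enum_hypothesis_list enum_reference_list

-- ===== PORT B =====
-- 'for j, (_, w) in enumerate(r): stacks.setdefault(w, []).append(j)'
def pvStacksB (enum_reference_list : List (Int × String)) : PySem.Dict String (List Int) :=
  (PySem.List.enumerate enum_reference_list 0).foldl
    (fun d p => d.modify p.2.2 [] (fun s => s ++ [p.1])) PySem.Dict.empty

-- 'for i in reversed(range(len(h))): … if stack: j = stack.pop() …'
def pvLoopB (h r : List (Int × String)) :
    List Nat → PySem.Dict String (List Int) → List (Int × Int) → List (Int × String) → PySem.Set Int →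
    (List (Int × Int)) × (List (Int × String)) × PySem.Set Int
  | [], _, wm, nh, mr => (wm, nh, mr)
  | i :: is, d, wm, nh, mr =>
    let p := h.getD i (0, "")
    let stack := d.getD p.2 []
    if hs : stack = [] then
      pvLoopB h r is d wm (nh ++ [p]) mr
    else
      let j := stack.getLast hs
      pvLoopB h r is (d.insert p.2 stack.dropLast)
        (wm ++ [(p.1, (PySem.List.pyGetD r j (0, "")).1)]) nh (mr.add j)

def match_enums_py_alt (enum_hypothesis_list : List (Int × String)) (enum_reference_list : List (Int × String)) : (List (Int × Int)) × (List (Int × String)) × (List (Int × String)) :=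
  let res := pvLoopB enum_hypothesis_list enum_reference_list
      ((List.range enum_hypothesis_list.length).reverse) (pvStacksB enum_reference_list) [] [] PySem.Set.empty
  (res.1, res.2.1.reverse,
   ((PySem.List.enumerate enum_reference_list 0).filter
      (fun jp => !(PySem.Set.contains res.2.2 jp.1))).map (·.2))

-- ===== PRECONDITION & SPEC =====
def Spec_match_enums_py (enum_hypothesis_list : List (Int × String)) (enum_reference_list : List (Int × String)) (out : (List (Int × Int)) × (List (Int × String)) × (List (Int × String))) : Prop := out = match_enums_py_alt enum_hypothesis_list enum_reference_list
instance (enum_hypothesis_list : List (Int × String)) (enum_reference_list : List (Int × String)) (out : (List (Int × Int)) × (List (Int × String)) × (List (Int × String))) : Decidable (Spec_match_enums_py enum_hypothesis_list enum_reference_list out) := by unfold Spec_match_enums_py; infer_instance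

-- ===== CLAIM (what is proved, stated in full; the proofs are below) =====
def Claim_equal_match_enums_py : Prop := ∀ (enum_hypothesis_list : List (Int × String)) (enum_reference_list : List (Int × String)), Dom_match_enums_py enum_hypothesis_list enum_reference_list → Spec_match_enums_py enum_hypothesis_list enum_reference_list (match_enums_py enum_hypothesis_list enum_reference_list)

-- ===== LEMMAS AND PROOFS =====

-- the references still unmatched, with their original enumerate indices
def pvQ (r : List (Int × String)) (mr : PySem.Set Int) : List (Int × (Int × String)) :=
  (PySem.List.enumerate r 0).filter (fun jp => !(PySem.Set.contains mr jp.1))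

lemma pvRangeRevSucc (n : Nat) : (List.range (n + 1)).reverse = n :: (List.range n).reverse := by
  simp [List.range_succ]

lemma pvFindJ_congr (w : String) (r₁ r₂ : List (Int × String)) :
    ∀ js : List Nat, (∀ j ∈ js, r₁.getD j (0, "") = r₂.getD j (0, "")) →
    pvFindJ w r₁ js = pvFindJ w r₂ js := by
  intro js
  induction js with
  | nil => intro _; rfl
  | cons j js ih =>
    intro hmem
    simp only [pvFindJ, hmem j (by simp)]
    split <;> [rfl; exact ih (fun x hx => hmem x (by simp [hx]))]

lemma pvFindJ_concat (w : String) (l : List (Int × String)) (x : Int × String) :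
    pvFindJ w (l ++ [x]) ((List.range (l.length + 1)).reverse) =
      if x.2 = w then some l.length else pvFindJ w l ((List.range l.length).reverse) := by
  rw [pvRangeRevSucc]
  have hx : (l ++ [x]).getD l.length (0, "") = x := by simp [List.getD]
  simp only [pvFindJ, hx]
  split
  · rfl
  · exact pvFindJ_congr w (l ++ [x]) l _ (fun j hj => by
      simp only [List.mem_reverse, List.mem_range] at hj
      simp [List.getD, List.getElem?_append_left hj])

-- with strictly increasing first components, filtering out e.1 is erasing position p
lemma pvFilter_ne_eraseIdx :
    ∀ (q : List (Int × (Int × String))) (p : Nat) (e : Int × (Int × String)),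
    q.Pairwise (fun a b => a.1 < b.1) → q[p]? = some e →
    q.filter (fun x => !(x.1 == e.1)) = q.eraseIdx p := by
  intro q
  induction q with
  | nil => intro p e _ he; simp at he
  | cons y t ih =>
    intro p e hpw he
    have hpt := (List.pairwise_cons.mp hpw).1
    cases p with
    | zero =>
      simp only [List.getElem?_cons_zero, Option.some.injEq] at he
      subst he
      simp only [List.eraseIdx, List.filter_cons, beq_self_eq_true, Bool.not_true]
      simp only [Bool.false_eq_true, if_false]
      exact List.filter_eq_self.mpr (fun x hx => by
        have := hpt x hx
        simp only [Bool.not_eq_true', beq_eq_false_iff_ne, ne_eq]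
        omega)
    | succ p =>
      simp only [List.getElem?_cons_succ] at he
      have hy : (y.1 == e.1) = false := by
        have := hpt e (List.mem_of_getElem? he)
        simp only [beq_eq_false_iff_ne, ne_eq]; omega
      simp only [List.eraseIdx, List.filter_cons, hy, Bool.not_false, if_pos]
      simp [ih p e (List.pairwise_cons.mp hpw).2 he]

lemma pvEraseIdx_map {α β : Type} (f : α → β) :
    ∀ (q : List α) (p : Nat), (q.map f).eraseIdx p = (q.eraseIdx p).map f := by
  intro q
  induction q with
  | nil => intro p; rfl
  | cons y t ih =>
    intro p
    cases p with
    | zero => rfl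
    | succ p => simp [List.eraseIdx, ih p]

-- characterisation of A's inner scan over the remaining references q
lemma pvFind_spec (w : String) :
    ∀ q : List (Int × (Int × String)),
    (q.filter (fun e => e.2.2 == w) = [] ∧
       pvFindJ w (q.map (·.2)) ((List.range (q.map (·.2)).length).reverse) = none) ∨
    (∃ (p : Nat) (e : Int × (Int × String)),
       pvFindJ w (q.map (·.2)) ((List.range (q.map (·.2)).length).reverse) = some p ∧
       q[p]? = some e ∧ e.2.2 = w ∧
       q.filter (fun e => e.2.2 == w) = (q.eraseIdx p).filter (fun e => e.2.2 == w) ++ [e] ∧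
       (∀ w', w' ≠ w → (q.eraseIdx p).filter (fun e => e.2.2 == w') = q.filter (fun e => e.2.2 == w'))) := by
  intro q
  induction q using List.reverseRecOn with
  | nil => left; exact ⟨rfl, rfl⟩
  | append_singleton l x ih =>
    have hmap : (l ++ [x]).map (·.2) = l.map (·.2) ++ [x.2] := by simp
    have hlen : (l.map (·.2)).length = l.length := by simp
    have hcat := pvFindJ_concat w (l.map (·.2)) x.2
    rw [hlen] at hcat
    by_cases hx : x.2.2 = w
    · right
      refine ⟨l.length, x, ?_, ?_, hx, ?_, ?_⟩
      · rw [hmap]; simpa [hx] using hcat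
      · simp
      · simp [List.filter_append, List.eraseIdx_append_of_length_le (le_refl l.length), hx]
      · intro w' hw'
        simp [List.filter_append, List.eraseIdx_append_of_length_le (le_refl l.length),
          show (x.2.2 == w') = false by simp [hx ▸ (Ne.symm hw')]]
    · rcases ih with ⟨hf, hn⟩ | ⟨p, e, hf, he, hew, hfe, hother⟩
      · left
        constructor
        · simp [List.filter_append, hf, hx]
        · rw [hlen] at hn
          rw [hmap, show (List.map (fun x => x.2) l ++ [x.2]).length = l.length + 1 by simp,
            hcat, if_neg hx]
          exact hn
      · right
        have hp : p < l.length := by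
          by_contra hge
          simp [List.getElem?_eq_none (by omega : l.length ≤ p)] at he
        refine ⟨p, e, ?_, ?_, hew, ?_, ?_⟩
        · rw [hlen] at hf
          rw [hmap, show (List.map (fun x => x.2) l ++ [x.2]).length = l.length + 1 by simp,
            hcat, if_neg hx]
          exact hf
        · rw [List.getElem?_append_left hp]; exact he
        · rw [List.eraseIdx_append_of_lt_length hp]
          simp [List.filter_append, hx, hfe]
        · intro w' hw'
          rw [List.eraseIdx_append_of_lt_length hp]
          simp [List.filter_append, hother w' hw']

lemma pvSetContainsAdd (s : PySem.Set Int) (x y : Int) :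
    PySem.Set.contains (PySem.Set.add s x) y = (PySem.Set.contains s y || y == x) := by
  unfold PySem.Set.add PySem.Set.contains
  split <;> cases hyx : (y == x) <;> simp_all

lemma pvQ_pairwise (r : List (Int × String)) (mr : PySem.Set Int) :
    (pvQ r mr).Pairwise (fun a b => a.1 < b.1) := by
  exact List.Pairwise.sublist (List.filter_sublist) (PySem.List.pairwise_lt_enumerate r 0)

lemma pvQ_add (r : List (Int × String)) (mr : PySem.Set Int) (p : Nat) (e : Int × (Int × String))
    (he : (pvQ r mr)[p]? = some e) :
    pvQ r (mr.add e.1) = (pvQ r mr).eraseIdx p := by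
  have h1 : pvQ r (mr.add e.1) = (pvQ r mr).filter (fun x => !(x.1 == e.1)) := by
    unfold pvQ
    rw [List.filter_filter]
    apply List.filter_congr
    intro x _
    rw [pvSetContainsAdd]
    cases h : PySem.Set.contains mr x.1 <;> cases h2 : (x.1 == e.1) <;> simp
  rw [h1, pvFilter_ne_eraseIdx _ p e (pvQ_pairwise r mr) he]

lemma pvQ_ref (r : List (Int × String)) (mr : PySem.Set Int) (e : Int × (Int × String))
    (he : e ∈ pvQ r mr) : PySem.List.pyGetD r e.1 (0, "") = e.2 := by
  unfold pvQ at he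
  have hmem := (List.mem_filter.mp he).1
  rw [PySem.List.mem_enumerate_iff] at hmem
  obtain ⟨k, hk, rfl⟩ := hmem
  simp [PySem.List.pyGetD_natCast, List.getD_eq_getElem?_getD, List.getElem?_eq_getElem hk]

lemma pvStacksB_getD (r : List (Int × String)) (w : String) :
    (pvStacksB r).getD w [] = ((PySem.List.enumerate r 0).filter (fun e => e.2.2 == w)).map (·.1) := by
  unfold pvStacksB
  rw [← List.foldl_map (f := fun p : Int × (Int × String) => (p.2.2, p.1))
    (g := fun (d : PySem.Dict String (List Int)) p => d.modify p.1 [] (fun s => s ++ [p.2]))]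
  rw [PySem.Dict.getD_foldl_modify_append]
  simp only [List.filter_map, List.map_map]
  rfl

lemma pvMain (h r : List (Int × String)) :
    ∀ (n : Nat), n ≤ h.length →
    ∀ (u : List (Int × String)) (wm : List (Int × Int)) (nh : List (Int × String))
      (mr : PySem.Set Int) (d : PySem.Dict String (List Int)),
    nh.reverse = u →
    (∀ w, d.getD w [] = ((pvQ r mr).filter (fun e => e.2.2 == w)).map (·.1)) →
    pvOuterA ((List.range n).reverse) wm (h.take n ++ u) ((pvQ r mr).map (·.2)) =
      ((pvLoopB h r ((List.range n).reverse) d wm nh mr).1,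
       (pvLoopB h r ((List.range n).reverse) d wm nh mr).2.1.reverse,
       (pvQ r (pvLoopB h r ((List.range n).reverse) d wm nh mr).2.2).map (·.2)) := by
  intro n
  induction n with
  | zero =>
    intro _ u wm nh mr d hnh hd
    simp [pvOuterA, pvLoopB, hnh]
  | succ n ih =>
    intro hlen u wm nh mr d hnh hd
    have hn : n < h.length := by omega
    rw [pvRangeRevSucc]
    have hgA : (h.take (n + 1) ++ u).getD n (0, "") = h.getD n (0, "") := by
      rw [List.getD, List.getD, List.getElem?_append_left (by simp; omega)]
      congr 1
      exact List.getElem?_take_of_lt (by omega)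
    have htake : h.take (n + 1) = h.take n ++ [h.getD n (0, "")] := by
      rw [List.take_add_one, List.getElem?_eq_getElem hn]
      simp [List.getD, List.getElem?_eq_getElem hn]
    rcases pvFind_spec (h.getD n (0, "")).2 (pvQ r mr) with ⟨hfil, hnone⟩ |
      ⟨pi, e, hfind, hget, hew, hfw, hother⟩
    · -- no match for this hypothesis word
      have hstack : d.getD (h.getD n (0, "")).2 [] = [] := by rw [hd, hfil]; rfl
      simp only [pvOuterA, pvLoopB, hgA, hnone, hstack]
      rw [dif_pos trivial]
      have hA : h.take (n + 1) ++ u = h.take n ++ (h.getD n (0, "") :: u) := by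
        rw [htake]; simp
      rw [hA]
      exact ih (by omega) _ wm (nh ++ [h.getD n (0, "")]) mr d (by simp [hnh]) hd
    · -- matched: A takes position pi of the remaining refs, B pops index e.1
      have hmem : e ∈ pvQ r mr := List.mem_of_getElem? hget
      have hrefid : PySem.List.pyGetD r e.1 (0, "") = e.2 := pvQ_ref r mr e hmem
      have hrA : ((pvQ r mr).map (·.2)).getD pi (0, "") = e.2 := by
        rw [List.getD, List.getElem?_map, hget]; rfl
      have hstack : d.getD (h.getD n (0, "")).2 [] =
          (((pvQ r mr).eraseIdx pi).filter (fun x => x.2.2 == (h.getD n (0, "")).2)).map (·.1)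
            ++ [e.1] := by
        rw [hd, hfw]; simp
      have hne : (((pvQ r mr).eraseIdx pi).filter
          (fun x => x.2.2 == (h.getD n (0, "")).2)).map (·.1) ++ [e.1] ≠ [] := by simp
      simp only [pvOuterA, pvLoopB, hgA, hfind, hstack]
      rw [dif_neg hne]
      have hlast : ((((pvQ r mr).eraseIdx pi).filter
          (fun x => x.2.2 == (h.getD n (0, "")).2)).map (·.1) ++ [e.1]).getLast hne = e.1 :=
        List.getLast_concat
      have hdrop : ((((pvQ r mr).eraseIdx pi).filter
          (fun x => x.2.2 == (h.getD n (0, "")).2)).map (·.1) ++ [e.1]).dropLast =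
          (((pvQ r mr).eraseIdx pi).filter (fun x => x.2.2 == (h.getD n (0, "")).2)).map (·.1) :=
        List.dropLast_concat
      rw [hlast, hdrop, hrefid, hrA]
      have hlt : (List.take n h).length = n := by rw [List.length_take]; omega
      have hAer : (h.take (n + 1) ++ u).eraseIdx n = h.take n ++ u := by
        rw [htake, List.append_assoc, List.eraseIdx_append_of_length_le hlt.le, hlt]
        simp
      have hQer : pvQ r (mr.add e.1) = (pvQ r mr).eraseIdx pi := pvQ_add r mr pi e hget
      have hrAer : ((pvQ r mr).map (·.2)).eraseIdx pi = (pvQ r (mr.add e.1)).map (·.2) := by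
        rw [hQer, pvEraseIdx_map]
      rw [hAer, hrAer]
      exact ih (by omega) u (wm ++ [((h.getD n (0, "")).1, e.2.1)]) nh (mr.add e.1) _ hnh
        (by
          intro w'
          rw [PySem.Dict.getD_insert]
          by_cases hw : w' = (h.getD n (0, "")).2
          · rw [if_pos hw, hQer, hw]
          · rw [if_neg hw, hd, hQer, hother w' hw])

-- ===== VERDICT (by name: the statement is the Claim_ definition above) =====
theorem match_enums_py_spec : Claim_equal_match_enums_py := by
  intro h r _
  unfold Spec_match_enums_py match_enums_py match_enums_py_alt
  have hq0 : pvQ r PySem.Set.empty = PySem.List.enumerate r 0 := by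
    simp [pvQ, PySem.Set.empty, PySem.Set.contains]
  have := pvMain h r h.length le_rfl [] [] [] PySem.Set.empty (pvStacksB r) rfl
    (by intro w; rw [pvStacksB_getD, hq0])
  simpa [hq0, PySem.List.map_snd_enumerate, pvQ, List.take_length] using this
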